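-- pv_equiv track=rewrite | github.com/AsrithSK/KLA | milestone2.py | checkifequal
-- ===== SOURCE A (Python) =====
-- def checkifequal(b1,b2):
--     if len(b1) != len(b2):
--         return False
--     # for i in range(0..len(b1)):
--     #     if(b1[i] != b2[i]):
--     #         return False
--     x = [b1[i:i + 2] for i in range(0, len(b1), 2)]
--     y = [b2[i:i + 2] for i in range(0, len(b2), 2)]
--     for i in x:
--         if i not in y:
--             return False
--     return True
-- ===== SOURCE B (Python) =====
-- def _chunks(s):
--     out = []
--     i = 0
--     while i < len(s):
--         out.append(s[i:i + 2])
--         i += 2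
--     return out
--
-- def checkifequal(b1, b2):
--     if len(b1) != len(b2):
--         return False
--     x = _chunks(b1)
--     y = _chunks(b2)
--     x.sort()
--     y.sort()
--     # merge walk: every chunk of sorted x must appear in sorted y
--     i = j = 0
--     while i < len(x):
--         if j >= len(y):
--             return False
--         if y[j] < x[i]:
--             j += 1
--         elif y[j] == x[i]:
--             i += 1
--         else:
--             return False
--     return True
-- ===== Notes on version B (the rewrite author's own statement) =====
-- stated objective: alternative
-- what changed: Replaces the per-chunk linear membership scan over y with sorting both chunk lists once and a single two-pointer merge walk that checks every x-chunk occurs in y.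
import Mathlib
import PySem

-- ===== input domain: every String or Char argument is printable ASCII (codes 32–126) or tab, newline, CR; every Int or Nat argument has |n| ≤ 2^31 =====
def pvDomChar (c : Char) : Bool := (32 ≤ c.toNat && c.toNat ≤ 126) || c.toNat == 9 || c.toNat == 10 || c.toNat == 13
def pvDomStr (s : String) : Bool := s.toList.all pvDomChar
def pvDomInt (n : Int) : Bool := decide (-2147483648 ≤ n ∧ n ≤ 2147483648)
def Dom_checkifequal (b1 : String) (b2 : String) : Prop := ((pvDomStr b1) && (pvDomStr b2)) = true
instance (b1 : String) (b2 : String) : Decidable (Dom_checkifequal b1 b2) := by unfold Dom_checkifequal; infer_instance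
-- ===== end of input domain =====

-- B replaces A's per-chunk linear membership scan with sort-both-chunk-lists and one two-pointer merge walk (alternative decomposition, same result).

-- ===== PORT A =====
-- for i in x: if i not in y: return False / return True
def pvALoop (x : List String) (y : List String) : Bool :=
  match x with
  | [] => true
  | i :: rest => if y.contains i then pvALoop rest y else false

def checkifequal (b1 : String) (b2 : String) : Bool :=
  if PySem.Str.len b1 ≠ PySem.Str.len b2 then false
  else
    let x := (PySem.List.pyRange 0 (PySem.Str.len b1) 2).map (fun i => PySem.Str.slice b1 (some i) (some (i + 2)))
    let y := (PySem.List.pyRange 0 (PySem.Str.len b2) 2).map (fun i => PySem.Str.slice b2 (some i) (some (i + 2)))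
    pvALoop x y

-- ===== PORT B =====
-- _chunks(s): while i < len(s): out.append(s[i:i+2]); i += 2
def pvChunks (s : String) (i : Int) : List String :=
  if i < PySem.Str.len s then
    PySem.Str.slice s (some i) (some (i + 2)) :: pvChunks s (i + 2)
  else []
termination_by (PySem.Str.len s - i).toNat
decreasing_by omega

-- the while-loop of Source B: i walks sorted x, j walks sorted y
def pvMerge (xs : List String) (ys : List String) : Bool :=
  match xs, ys with
  | [], _ => true
  | _ :: _, [] => false
  | x :: xs', y :: ys' =>
    if y < x then pvMerge (x :: xs') ys'
    else if y == x then pvMerge xs' (y :: ys')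
    else false
termination_by (xs.length + ys.length)

def checkifequal_alt (b1 : String) (b2 : String) : Bool :=
  if PySem.Str.len b1 ≠ PySem.Str.len b2 then false
  else
    let x := pvChunks b1 0
    let y := pvChunks b2 0
    pvMerge (PySem.List.sorted x id false) (PySem.List.sorted y id false)

-- ===== PRECONDITION & SPEC =====
def Spec_checkifequal (b1 : String) (b2 : String) (out : Bool) : Prop := out = checkifequal_alt b1 b2
instance (b1 : String) (b2 : String) (out : Bool) : Decidable (Spec_checkifequal b1 b2 out) := by unfold Spec_checkifequal; infer_instance

-- ===== CLAIM (what is proved, stated in full; the proofs are below) =====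
def Claim_equal_checkifequal : Prop := ∀ (b1 : String) (b2 : String), Dom_checkifequal b1 b2 → Spec_checkifequal b1 b2 (checkifequal b1 b2)

-- ===== LEMMAS AND PROOFS =====

theorem pyRange_two_nil (a b : Int) (h : ¬ a < b) : PySem.List.pyRange a b 2 = [] := by
  rw [PySem.List.pyRange_of_pos a b (by norm_num)]
  simp [h]

theorem pyRange_two_cons (a b : Int) (h : a < b) :
    PySem.List.pyRange a b 2 = a :: PySem.List.pyRange (a + 2) b 2 := by
  rw [PySem.List.pyRange_of_pos a b (by norm_num), PySem.List.pyRange_of_pos (a + 2) b (by norm_num)]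
  have hn : (if a < b then ((b - a + 2 - 1) / 2).toNat else 0)
      = (if a + 2 < b then ((b - (a + 2) + 2 - 1) / 2).toNat else 0) + 1 := by
    by_cases h2 : a + 2 < b <;> simp only [h, h2, if_true, if_false] <;> omega
  rw [hn, List.range_succ_eq_map]
  simp only [List.map_cons, List.map_map, Function.comp_def]
  refine List.cons_eq_cons.mpr ⟨by ring, ?_⟩
  exact List.map_congr_left (fun k _ => by push_cast [Nat.succ_eq_add_one]; ring)

-- B's while-loop chunker equals A's range-comprehension chunking
theorem pvChunks_eq (s : String) (i : Int) :
    pvChunks s i = (PySem.List.pyRange i (PySem.Str.len s) 2).map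
      (fun j => PySem.Str.slice s (some j) (some (j + 2))) := by
  fun_induction pvChunks s i with
  | case1 i h ih => rw [pyRange_two_cons i _ h, List.map_cons, ih]
  | case2 i h => rw [pyRange_two_nil i _ h]; rfl

-- A's loop is the 'all chunks are members' predicate
theorem pvALoop_eq_all (x y : List String) : pvALoop x y = x.all (fun s => y.contains s) := by
  induction x with
  | nil => rfl
  | cons i rest ih =>
    simp only [pvALoop, ih, List.all_cons]
    cases y.contains i <;> simp

theorem pvAllCongr {α : Type} (l : List α) (p q : α → Bool) (h : ∀ x ∈ l, p x = q x) :
    l.all p = l.all q := by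
  induction l with
  | nil => rfl
  | cons a t ih =>
    simp only [List.all_cons, h a (List.mem_cons_self), ih (fun x hx => h x (List.mem_cons_of_mem a hx))]

-- B's merge walk computes the same membership test when both lists are sorted
theorem pvMerge_eq_all (xs ys : List String) (hx : xs.Pairwise (· ≤ ·)) (hy : ys.Pairwise (· ≤ ·)) :
    pvMerge xs ys = xs.all (fun s => ys.contains s) := by
  fun_induction pvMerge xs ys with
  | case1 ys => simp
  | case2 x xs' => simp
  | case3 x xs' y ys' hlt ih =>
    -- y < x : y cannot occur in x :: xs' (all ≥ x), so dropping y changes no membership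
    have hx' := hx
    rw [ih hx (List.Pairwise.sublist (List.sublist_cons_self y ys') hy)]
    refine (pvAllCongr _ _ _ (fun s hs => ?_)).symm
    have hxs : x ≤ s := by
      rcases hs with _ | hmem
      · exact le_refl _
      · exact (List.pairwise_cons.mp hx).1 s (by assumption)
    have hne : ¬ (y == s) := by
      simp only [beq_iff_eq]
      intro h; subst h; exact absurd (lt_of_lt_of_le hlt hxs) (lt_irrefl _)
    simp only [List.contains_cons]
    have hf : (s == y) = false := by
      simp only [beq_eq_false_iff_ne]
      intro h; exact hne (beq_iff_eq.mpr h.symm)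
    rw [hf, Bool.false_or]
  | case4 x xs' y ys' hlt heq ih =>
    -- y == x : x is present; drop it from xs
    have hx' : xs'.Pairwise (· ≤ ·) := (List.pairwise_cons.mp hx).2
    rw [ih hx' hy]
    have : (y :: ys').contains x = true := by
      simp only [List.contains_cons, Bool.or_eq_true]
      left; exact beq_iff_eq.mpr (beq_iff_eq.mp heq).symm
    simp only [List.all_cons]
    rw [this, Bool.true_and]
  | case5 x xs' y ys' hlt hne =>
    -- x < y ≤ every element of ys : x not in y :: ys'
    have hxy : x < y := by
      rcases lt_trichotomy y x with h | h | h
      · exact absurd h hlt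
      · exact absurd (beq_iff_eq.mpr h) (by simpa using hne)
      · exact h
    have : (y :: ys').contains x = false := by
      simp only [List.contains_eq_any_beq, List.any_eq_false]
      intro a ha
      rcases ha with _ | hmem
      · simp only [beq_iff_eq]; intro h; subst h; exact lt_irrefl _ hxy
      · have : y ≤ a := (List.pairwise_cons.mp hy).1 a (by assumption)
        simp only [beq_iff_eq]; intro h; subst h
        exact absurd (lt_of_lt_of_le hxy this) (lt_irrefl _)
    simp only [List.all_cons]
    rw [this, Bool.false_and]

theorem contains_perm {l₁ l₂ : List String} (h : l₁.Perm l₂) (a : String) : l₁.contains a = l₂.contains a := by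
  simp [h.mem_iff]

-- ===== VERDICT (by name: the statement is the Claim_ definition above) =====
theorem checkifequal_spec : Claim_equal_checkifequal := by
  intro b1 b2 _
  unfold Spec_checkifequal checkifequal checkifequal_alt
  by_cases hlen : PySem.Str.len b1 ≠ PySem.Str.len b2
  · rw [if_pos hlen, if_pos hlen]
  · rw [if_neg hlen, if_neg hlen]
    rw [pvChunks_eq b1 0, pvChunks_eq b2 0]
    set x := (PySem.List.pyRange 0 (PySem.Str.len b1) 2).map (fun i => PySem.Str.slice b1 (some i) (some (i + 2))) with hxdef
    set y := (PySem.List.pyRange 0 (PySem.Str.len b2) 2).map (fun i => PySem.Str.slice b2 (some i) (some (i + 2))) with hydef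
    have hpx := PySem.List.sorted_perm x id false
    have hpy := PySem.List.sorted_perm y id false
    rw [pvALoop_eq_all,
        pvMerge_eq_all _ _ (by simpa using PySem.List.sorted_pairwise x id)
          (by simpa using PySem.List.sorted_pairwise y id)]
    rw [← hpx.all_eq]
    exact pvAllCongr _ _ _ (fun s _ => (contains_perm hpy.symm s))
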